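-- pv_equiv track=rewrite | github.com/baesh3744/algorithm-solutions | baekjoon/21000/21320_igorant_dp.py | count_teleport
-- ===== SOURCE A (Python) =====
-- def get_cache(n: int) -> list[list[int]]:
--     cache: list[list[int]] = [[height for _ in range(2)] for height in range(n + 1)]
--     for height in range(2, n + 1):
--         # from root
--         cache[height][0] = cache[height - 1][0] + cache[height - 1][1]
--         # from leaf
--         cache[height][1] = cache[height - 1][0]
--         for sub_height in range(1, height - 1):
--             cache[height][1] += cache[sub_height][1]
--     return cache
--
-- def count_teleport(n: int, k: int) -> int:
--     cache = get_cache(n)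
--     k_height = n - k + 1
--
--     ans: int = 0
--     if k_height == n:
--         ans = cache[n][0]
--     elif k_height == 1:
--         ans = cache[n][1]
--     else:
--         ans += cache[n - 1][0]
--         for height in range(k_height, n - 1):
--             ans += cache[height][1]
--         ans += 2 * cache[k_height - 1][1]
--     return ans - 1
-- ===== SOURCE B (Python) =====
-- def count_teleport(n: int, k: int) -> int:
--     # Same DP, but cache[height][1] is computed with a running prefix sum s of the
--     # earlier column-1 values instead of re-summing them in an inner loop: O(n) not O(n^2).
--     a = list(range(n + 1))  # cache[.][0]
--     b = list(range(n + 1))  # cache[.][1]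
--     s = 0                   # b[1] + ... + b[height - 2]
--     for height in range(2, n + 1):
--         a[height] = a[height - 1] + b[height - 1]
--         b[height] = a[height - 1] + s
--         s += b[height - 1]
--     k_height = n - k + 1
--     if k_height == n:
--         ans = a[n]
--     elif k_height == 1:
--         ans = b[n]
--     else:
--         ans = a[n - 1]
--         for height in range(k_height, n - 1):
--             ans += b[height]
--         ans += 2 * b[k_height - 1]
--     return ans - 1
-- ===== Notes on version B (the rewrite author's own statement) =====
-- stated objective: faster
-- what changed: Intended as faster (measured ~126x at the largest size both versions finished): B keeps a running prefix sum of the earlier cache[.][1] values while filling the table, so the O(height) inner re-summation loop of A's get_cache disappears; the table becomes two flat integer lists filled in one pass.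
import Mathlib
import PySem

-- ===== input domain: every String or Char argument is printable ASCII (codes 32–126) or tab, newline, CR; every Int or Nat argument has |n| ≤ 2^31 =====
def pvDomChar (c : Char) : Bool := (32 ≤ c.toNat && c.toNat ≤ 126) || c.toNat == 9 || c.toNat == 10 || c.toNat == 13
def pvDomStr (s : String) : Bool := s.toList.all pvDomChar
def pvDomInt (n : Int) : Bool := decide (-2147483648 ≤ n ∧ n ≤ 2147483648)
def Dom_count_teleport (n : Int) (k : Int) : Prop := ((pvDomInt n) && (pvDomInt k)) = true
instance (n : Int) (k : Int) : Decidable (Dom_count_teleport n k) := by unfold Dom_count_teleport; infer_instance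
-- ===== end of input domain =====

-- B fills A's DP table in one pass with a running prefix sum, removing get_cache's inner re-summation loop (intended as faster; a timing run measured B well ahead at the sizes both finish).

-- ===== PORT A =====
-- list rows are the two-element lists cache[h]; reads are ported with pyGetD — every read A makes
-- under Pre_ is in range, so the default (0, 0) is never consulted there (Python would raise outside Pre_)
def pvRow (c : List (Int × Int)) (i : Int) : Int × Int := PySem.List.pyGetD c i (0, 0)

def pvGetCache (n : Int) : List (Int × Int) :=
  let init := (PySem.List.pyRange 0 (n + 1) 1).map (fun h => (h, h))
  (PySem.List.pyRange 2 (n + 1) 1).foldl (fun cache height =>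
    let prev := pvRow cache (height - 1)
    -- cache[height][0] = cache[height-1][0] + cache[height-1][1]; cache[height][1] = cache[height-1][0]
    let cache1 := PySem.List.pySetD cache height (prev.1 + prev.2, prev.1)
    -- for sub_height in range(1, height - 1): cache[height][1] += cache[sub_height][1]
    (PySem.List.pyRange 1 (height - 1) 1).foldl (fun c sub =>
      let cur := pvRow c height
      PySem.List.pySetD c height (cur.1, cur.2 + (pvRow c sub).2)) cache1) init

def count_teleport (n : Int) (k : Int) : Int :=
  let cache := pvGetCache n
  let kh := n - k + 1
  let ans : Int :=
    if kh = n then (pvRow cache n).1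
    else if kh = 1 then (pvRow cache n).2
    else (pvRow cache (n - 1)).1
         + (PySem.List.pyRange kh (n - 1) 1).foldl (fun acc h => acc + (pvRow cache h).2) 0
         + 2 * (pvRow cache (kh - 1)).2
  ans - 1

-- ===== PORT B =====
def count_teleport_alt (n : Int) (k : Int) : Int :=
  let st := (PySem.List.pyRange 2 (n + 1) 1).foldl
    (fun (st : List Int × List Int × Int) height =>
      let a1 := PySem.List.pySetD st.1 height
        (PySem.List.pyGetD st.1 (height - 1) 0 + PySem.List.pyGetD st.2.1 (height - 1) 0)
      let b1 := PySem.List.pySetD st.2.1 height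
        (PySem.List.pyGetD a1 (height - 1) 0 + st.2.2)
      (a1, b1, st.2.2 + PySem.List.pyGetD b1 (height - 1) 0))
    (PySem.List.pyRange 0 (n + 1) 1, PySem.List.pyRange 0 (n + 1) 1, 0)
  let kh := n - k + 1
  let ans :=
    if kh = n then PySem.List.pyGetD st.1 n 0
    else if kh = 1 then PySem.List.pyGetD st.2.1 n 0
    else PySem.List.pyGetD st.1 (n - 1) 0
         + (PySem.List.pyRange kh (n - 1) 1).foldl (fun acc h => acc + PySem.List.pyGetD st.2.1 h 0) 0
         + 2 * PySem.List.pyGetD st.2.1 (kh - 1) 0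
  ans - 1

-- ===== PRECONDITION & SPEC =====
-- exactly the inputs on which A returns normally: outside them (n < 0, k < 0, or k > 2n+1)
-- A raises IndexError — and so does B, at the same reads
def Pre_count_teleport (n : Int) (k : Int) : Prop := 0 ≤ n ∧ 0 ≤ k ∧ k ≤ 2 * n + 1
instance (n : Int) (k : Int) : Decidable (Pre_count_teleport n k) := by unfold Pre_count_teleport; infer_instance
def pvWitness_count_teleport : Int × Int := (6, 3)

def Spec_count_teleport (n : Int) (k : Int) (out : Int) : Prop := out = count_teleport_alt n k
instance (n : Int) (k : Int) (out : Int) : Decidable (Spec_count_teleport n k out) := by unfold Spec_count_teleport; infer_instance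

-- ===== CLAIM (what is proved, stated in full; the proofs are below) =====
def Claim_equal_count_teleport : Prop := ∀ (n : Int) (k : Int), Dom_count_teleport n k → Pre_count_teleport n k → Spec_count_teleport n k (count_teleport n k)

-- ===== LEMMAS AND PROOFS =====

-- the two columns of A's table as Nat-indexed sequences: aj is cache[.][0], bj is cache[.][1]
def bj : Nat → Int
  | 0 => 0
  | 1 => 1
  | (h + 2) => bj (h + 1) + 2 * bj h

def aj : Nat → Int
  | 0 => 0
  | 1 => 1
  | (h + 2) => aj (h + 1) + bj (h + 1)

-- sj h = bj 1 + ... + bj h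
def sj : Nat → Int
  | 0 => 0
  | (h + 1) => sj h + bj (h + 1)

theorem bj_add2 (h : Nat) : bj (h + 2) = bj (h + 1) + 2 * bj h := rfl
theorem aj_add2 (h : Nat) : aj (h + 2) = aj (h + 1) + bj (h + 1) := rfl
theorem sj_succ (h : Nat) : sj (h + 1) = sj h + bj (h + 1) := rfl

theorem aj_succ (H : Nat) (h : 1 ≤ H) : aj (H + 1) = aj H + bj H := by
  obtain ⟨m, rfl⟩ : ∃ m, H = m + 1 := ⟨H - 1, by omega⟩
  exact aj_add2 m

-- A's inner loop computes bj: bj (h+2) = aj (h+1) + (bj 1 + ... + bj h)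
theorem bj_closed : ∀ h : Nat, bj (h + 2) = aj (h + 1) + sj h := by
  intro h
  induction h with
  | zero => simp [bj, aj, sj]
  | succ m ih =>
    have e : m + 1 + 1 = m + 2 := rfl
    rw [bj_add2, sj_succ, aj_add2, e]
    have := bj_add2 m
    omega

-- ---------- A's cache ----------

-- the model of A's cache after the outer loop has processed heights 2 .. H
def pvModel (n : Int) (H : Nat) : List (Int × Int) :=
  (PySem.List.pyRange 0 (n + 1) 1).map
    (fun h => if h ≤ (H : Int) then (aj h.toNat, bj h.toNat) else (h, h))

-- the model mid-row-update: row H+1 holds x, rows ≤ H are final, the rest initial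
def pvModel2 (n : Int) (H : Nat) (x : Int × Int) : List (Int × Int) :=
  (PySem.List.pyRange 0 (n + 1) 1).map
    (fun h => if h = (H : Int) + 1 then x
              else if h ≤ (H : Int) then (aj h.toNat, bj h.toNat) else (h, h))

theorem pv_set_map {α : Type} (L t : Int) (f : Int → α) (v : α) (h0 : 0 ≤ t) (_h1 : t < L) :
    PySem.List.pySetD ((PySem.List.pyRange 0 L 1).map f) t v
      = (PySem.List.pyRange 0 L 1).map (fun h => if h = t then v else f h) := by
  rw [PySem.List.pySetD_of_nonneg _ v h0]
  apply List.ext_getElem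
  · simp [PySem.List.length_pyRange_one]
  · intro i hi1 hi2
    have hiL : i < (L - 0).toNat := by
      simpa [PySem.List.length_pyRange_one] using hi2
    rw [List.getElem_set]
    simp only [List.getElem_map, PySem.List.getElem_pyRange_one]
    split_ifs with hA hB hB
    · rfl
    · exact absurd (by omega : (0 : Int) + i = t) hB
    · exact absurd (by omega : t.toNat = i) hA
    · rfl

theorem pvRow_model (n : Int) (H : Nat) (i : Int) (h0 : 0 ≤ i) (h1 : i < n + 1) :
    pvRow (pvModel n H) i
      = if i ≤ (H : Int) then (aj i.toNat, bj i.toNat) else (i, i) := by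
  unfold pvRow pvModel
  exact PySem.List.pyGetD_map_pyRange_of_nonneg _ _ _ _ h0 h1

theorem pvRow_model2 (n : Int) (H : Nat) (x : Int × Int) (i : Int) (h0 : 0 ≤ i) (h1 : i < n + 1) :
    pvRow (pvModel2 n H x) i
      = if i = (H : Int) + 1 then x
        else if i ≤ (H : Int) then (aj i.toNat, bj i.toNat) else (i, i) := by
  unfold pvRow pvModel2
  exact PySem.List.pyGetD_map_pyRange_of_nonneg _ _ _ _ h0 h1

theorem pvSet_model2 (n : Int) (H : Nat) (x y : Int × Int) (hn : (H : Int) + 1 < n + 1) :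
    PySem.List.pySetD (pvModel2 n H x) ((H : Int) + 1) y = pvModel2 n H y := by
  unfold pvModel2
  rw [pv_set_map _ _ _ _ (by omega) hn]
  apply List.map_congr_left
  intro h _
  by_cases hh : h = (H : Int) + 1 <;> simp [hh]

theorem pvSet_model (n : Int) (H : Nat) (y : Int × Int) (hn : (H : Int) + 1 < n + 1) :
    PySem.List.pySetD (pvModel n H) ((H : Int) + 1) y = pvModel2 n H y := by
  unfold pvModel pvModel2
  rw [pv_set_map _ _ _ _ (by omega) hn]

theorem pvModel2_done (n : Int) (H : Nat) :
    pvModel2 n H (aj (H + 1), bj (H + 1)) = pvModel n (H + 1) := by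
  unfold pvModel2 pvModel
  apply List.map_congr_left
  intro h hmem
  have h0 : 0 ≤ h := by
    have := (PySem.List.mem_pyRange_one.mp hmem).1; omega
  by_cases hh : h = (H : Int) + 1
  · have ht : h.toNat = H + 1 := by omega
    have hle : h ≤ ((H + 1 : Nat) : Int) := by push_cast; omega
    rw [if_pos hh, if_pos hle, ht]
  · have hcond : (h ≤ ((H + 1 : Nat) : Int)) ↔ (h ≤ (H : Int)) := by push_cast; omega
    simp only [if_neg hh]
    rw [if_congr hcond rfl rfl]

-- the inner loop: after subs 1 .. u, row H+1 holds (aj (H+1), aj H + sj u)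
theorem pv_inner (n : Int) (H : Nat) (hH : 1 ≤ H) (hn : (H : Int) + 1 ≤ n) :
    ∀ u : Nat, u + 1 ≤ H →
      (PySem.List.pyRange 1 ((u : Int) + 1) 1).foldl
          (fun c sub =>
            PySem.List.pySetD c ((H : Int) + 1)
              ((pvRow c ((H : Int) + 1)).1,
               (pvRow c ((H : Int) + 1)).2 + (pvRow c sub).2))
          (pvModel2 n H (aj (H + 1), aj H))
        = pvModel2 n H (aj (H + 1), aj H + sj u) := by
  intro u
  induction u with
  | zero =>
    intro _
    rw [PySem.List.pyRange_one_eq_nil (by omega)]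
    simp [sj]
  | succ u ih =>
    intro hu
    have hsplit : PySem.List.pyRange 1 (((u + 1 : Nat) : Int) + 1) 1
        = PySem.List.pyRange 1 ((u : Int) + 1) 1 ++ [(u : Int) + 1] := by
      push_cast
      exact PySem.List.pyRange_one_succ_right (by omega)
    rw [hsplit, List.foldl_append, ih (by omega)]
    simp only [List.foldl_cons, List.foldl_nil]
    rw [pvRow_model2 n H _ ((H : Int) + 1) (by omega) (by omega),
        pvRow_model2 n H _ ((u : Int) + 1) (by omega) (by omega)]
    rw [if_pos rfl, if_neg (by omega), if_pos (by omega : (u : Int) + 1 ≤ (H : Int))]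
    rw [pvSet_model2 n H _ _ (by omega)]
    have ht : ((u : Int) + 1).toNat = u + 1 := by omega
    have hv : aj H + sj u + bj (((u : Int) + 1).toNat) = aj H + sj (u + 1) := by
      rw [ht, sj_succ]; ring
    rw [hv]

-- the initial cache is pvModel n 1 (rows 0 and 1 are already final)
theorem pv_init (n : Int) :
    (PySem.List.pyRange 0 (n + 1) 1).map (fun h => (h, h)) = pvModel n 1 := by
  unfold pvModel
  apply List.map_congr_left
  intro h hmem
  have h0 : 0 ≤ h := by
    have := (PySem.List.mem_pyRange_one.mp hmem).1; omega
  by_cases hle : h ≤ ((1 : Nat) : Int)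
  · rw [if_pos hle]
    have : h = 0 ∨ h = 1 := by omega
    rcases this with h' | h' <;> subst h' <;> decide
  · rw [if_neg hle]

-- after the outer loop has processed heights 2 .. H the cache is pvModel n H
theorem pv_outer (n : Int) :
    ∀ H : Nat, 1 ≤ H → (H : Int) ≤ n →
      (PySem.List.pyRange 2 ((H : Int) + 1) 1).foldl
          (fun cache height =>
            let prev := pvRow cache (height - 1)
            let cache1 := PySem.List.pySetD cache height (prev.1 + prev.2, prev.1)
            (PySem.List.pyRange 1 (height - 1) 1).foldl (fun c sub =>
              let cur := pvRow c height
              PySem.List.pySetD c height (cur.1, cur.2 + (pvRow c sub).2)) cache1)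
          ((PySem.List.pyRange 0 (n + 1) 1).map (fun h => (h, h)))
        = pvModel n H := by
  intro H
  induction H with
  | zero => intro h; exact absurd h (by omega)
  | succ H ih =>
    intro _ hHn
    by_cases hH : 1 ≤ H
    · have hsplit : PySem.List.pyRange 2 (((H + 1 : Nat) : Int) + 1) 1
          = PySem.List.pyRange 2 ((H : Int) + 1) 1 ++ [(H : Int) + 1] := by
        push_cast
        exact PySem.List.pyRange_one_succ_right (by omega)
      rw [hsplit, List.foldl_append, ih hH (by omega)]
      simp only [List.foldl_cons, List.foldl_nil]
      have e1 : (H : Int) + 1 - 1 = (H : Int) := by ring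
      rw [e1]
      rw [pvRow_model n H (H : Int) (by omega) (by omega), if_pos (by omega)]
      have htH : ((H : Int)).toNat = H := by omega
      rw [htH]
      rw [pvSet_model n H _ (by omega)]
      have haj : (aj H + bj H, aj H) = (aj (H + 1), aj H) := by
        rw [aj_succ H hH]
      rw [haj]
      have hin := pv_inner n H hH (by omega) (H - 1) (by omega)
      rw [show (((H - 1 : Nat)) : Int) + 1 = (H : Int) from by omega] at hin
      rw [hin]
      have hbj : aj H + sj (H - 1) = bj (H + 1) := by
        have hc := bj_closed (H - 1)
        have e2 : H - 1 + 2 = H + 1 := by omega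
        have e3 : H - 1 + 1 = H := by omega
        rw [e2, e3] at hc
        omega
      rw [hbj, pvModel2_done]
    · have hH0 : H = 0 := by omega
      subst hH0
      rw [show PySem.List.pyRange 2 ((((0 + 1 : Nat) : Int)) + 1) 1 = [] from
            PySem.List.pyRange_one_eq_nil (by push_cast)]
      simpa using pv_init n

theorem pvGetCache_eq (n : Int) (hn : 1 ≤ n) : pvGetCache n = pvModel n n.toNat := by
  unfold pvGetCache
  have hcast : ((n.toNat : Int)) = n := by omega
  have := pv_outer n n.toNat (by omega) (by omega)
  rw [hcast] at this
  exact this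

-- ---------- B's two flat lists ----------

-- B's column list f after the loop has processed heights 2 .. H
def pvArr (n : Int) (f : Nat → Int) (H : Nat) : List Int :=
  (PySem.List.pyRange 0 (n + 1) 1).map (fun h => if h ≤ (H : Int) then f h.toNat else h)

-- B's column mid-update: slot H+1 holds x
def pvArr2 (n : Int) (f : Nat → Int) (H : Nat) (x : Int) : List Int :=
  (PySem.List.pyRange 0 (n + 1) 1).map
    (fun h => if h = (H : Int) + 1 then x else if h ≤ (H : Int) then f h.toNat else h)

theorem pvArr_get (n : Int) (f : Nat → Int) (H : Nat) (i : Int) (h0 : 0 ≤ i) (h1 : i < n + 1) :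
    PySem.List.pyGetD (pvArr n f H) i 0 = if i ≤ (H : Int) then f i.toNat else i := by
  unfold pvArr
  exact PySem.List.pyGetD_map_pyRange_of_nonneg _ _ _ _ h0 h1

theorem pvArr_set (n : Int) (f : Nat → Int) (H : Nat) (x : Int) (hn : (H : Int) + 1 < n + 1) :
    PySem.List.pySetD (pvArr n f H) ((H : Int) + 1) x = pvArr2 n f H x := by
  unfold pvArr pvArr2
  rw [pv_set_map _ _ _ _ (by omega) hn]

theorem pvArr2_done (n : Int) (f : Nat → Int) (H : Nat) :
    pvArr2 n f H (f (H + 1)) = pvArr n f (H + 1) := by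
  unfold pvArr2 pvArr
  apply List.map_congr_left
  intro h hmem
  have h0 : 0 ≤ h := by
    have := (PySem.List.mem_pyRange_one.mp hmem).1; omega
  by_cases hh : h = (H : Int) + 1
  · have ht : h.toNat = H + 1 := by omega
    have hle : h ≤ ((H + 1 : Nat) : Int) := by push_cast; omega
    rw [if_pos hh, if_pos hle, ht]
  · have hcond : (h ≤ ((H + 1 : Nat) : Int)) ↔ (h ≤ (H : Int)) := by push_cast; omega
    rw [if_neg hh, if_congr hcond rfl rfl]

theorem pvArr_init (n : Int) (f : Nat → Int) (hf0 : f 0 = 0) (hf1 : f 1 = 1) :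
    PySem.List.pyRange 0 (n + 1) 1 = pvArr n f 1 := by
  unfold pvArr
  conv_lhs => rw [← List.map_id (PySem.List.pyRange 0 (n + 1) 1)]
  apply List.map_congr_left
  intro h hmem
  have h0 : 0 ≤ h := by
    have := (PySem.List.mem_pyRange_one.mp hmem).1; omega
  by_cases hle : h ≤ ((1 : Nat) : Int)
  · rw [id_eq, if_pos hle]
    have : h = 0 ∨ h = 1 := by omega
    rcases this with h' | h' <;> subst h' <;> simp [hf0, hf1]
  · rw [id_eq, if_neg hle]

-- B's loop: after heights 2 .. H the state is (column 0, column 1, prefix sum s)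
theorem pv_b_outer (n : Int) :
    ∀ H : Nat, 1 ≤ H → (H : Int) ≤ n →
      (PySem.List.pyRange 2 ((H : Int) + 1) 1).foldl
          (fun (st : List Int × List Int × Int) height =>
            let a1 := PySem.List.pySetD st.1 height
              (PySem.List.pyGetD st.1 (height - 1) 0 + PySem.List.pyGetD st.2.1 (height - 1) 0)
            let b1 := PySem.List.pySetD st.2.1 height
              (PySem.List.pyGetD a1 (height - 1) 0 + st.2.2)
            (a1, b1, st.2.2 + PySem.List.pyGetD b1 (height - 1) 0))
          (PySem.List.pyRange 0 (n + 1) 1, PySem.List.pyRange 0 (n + 1) 1, 0)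
        = (pvArr n aj H, pvArr n bj H, sj (H - 1)) := by
  intro H
  induction H with
  | zero => intro h; exact absurd h (by omega)
  | succ H ih =>
    intro _ hHn
    by_cases hH : 1 ≤ H
    · have hsplit : PySem.List.pyRange 2 (((H + 1 : Nat) : Int) + 1) 1
          = PySem.List.pyRange 2 ((H : Int) + 1) 1 ++ [(H : Int) + 1] := by
        push_cast
        exact PySem.List.pyRange_one_succ_right (by omega)
      rw [hsplit, List.foldl_append, ih hH (by omega)]
      simp only [List.foldl_cons, List.foldl_nil]
      have e1 : (H : Int) + 1 - 1 = (H : Int) := by ring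
      rw [e1]
      rw [pvArr_get n aj H (H : Int) (by omega) (by omega), if_pos (by omega),
          pvArr_get n bj H (H : Int) (by omega) (by omega), if_pos (by omega)]
      have htH : ((H : Int)).toNat = H := by omega
      rw [htH]
      rw [show aj H + bj H = aj (H + 1) from (aj_succ H hH).symm]
      rw [pvArr_set n aj H _ (by omega), pvArr2_done n aj H]
      rw [pvArr_get n aj (H + 1) (H : Int) (by omega) (by omega),
          if_pos (by push_cast; omega), htH]
      have hbj : aj H + sj (H - 1) = bj (H + 1) := by
        have hc := bj_closed (H - 1)
        have e2 : H - 1 + 2 = H + 1 := by omega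
        have e3 : H - 1 + 1 = H := by omega
        rw [e2, e3] at hc
        omega
      rw [hbj, pvArr_set n bj H _ (by omega), pvArr2_done n bj H]
      rw [pvArr_get n bj (H + 1) (H : Int) (by omega) (by omega),
          if_pos (by push_cast; omega), htH]
      have hsj : sj (H - 1) + bj H = sj H := by
        have := sj_succ (H - 1)
        have e3 : H - 1 + 1 = H := by omega
        rw [e3] at this
        omega
      rw [hsj, show H + 1 - 1 = H from by omega]
    · have hH0 : H = 0 := by omega
      subst hH0
      rw [show PySem.List.pyRange 2 ((((0 + 1 : Nat) : Int)) + 1) 1 = [] from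
            PySem.List.pyRange_one_eq_nil (by push_cast)]
      simp only [List.foldl_nil]
      rw [← pvArr_init n aj rfl rfl, ← pvArr_init n bj rfl rfl]
      rfl

-- ---------- splitting A's list of pairs into B's two lists ----------

theorem pv_pyGet?_map {α β : Type} (f : α → β) (xs : List α) (i : Int) :
    PySem.List.pyGet? (xs.map f) i = (PySem.List.pyGet? xs i).map f := by
  simp [PySem.List.pyGet?, PySem.List.pyIdx?]

theorem pvRow_split (n : Int) (H : Nat) (i : Int) :
    pvRow (pvModel n H) i
      = (PySem.List.pyGetD (pvArr n aj H) i 0, PySem.List.pyGetD (pvArr n bj H) i 0) := by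
  have hpair : pvModel n H
      = (PySem.List.pyRange 0 (n + 1) 1).map
          (fun h => ((if h ≤ (H : Int) then aj h.toNat else h),
                     (if h ≤ (H : Int) then bj h.toNat else h))) := by
    unfold pvModel
    apply List.map_congr_left
    intro h _
    by_cases hle : h ≤ (H : Int) <;> simp [hle]
  unfold pvRow pvArr PySem.List.pyGetD
  rw [hpair, pv_pyGet?_map, pv_pyGet?_map, pv_pyGet?_map]
  cases PySem.List.pyGet? (PySem.List.pyRange 0 (n + 1) 1) i <;> rfl

-- ===== VERDICT (by name: the statement is the Claim_ definition above) =====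
theorem count_teleport_spec : Claim_equal_count_teleport := by
  intro n k _dom hpre
  obtain ⟨hn0, hk0, hk2⟩ := hpre
  unfold Spec_count_teleport
  by_cases hn : n = 0
  · subst hn
    have : k = 0 ∨ k = 1 := by omega
    rcases this with h' | h' <;> subst h' <;> decide
  · have hn1 : 1 ≤ n := by omega
    have hnN : n = ((n.toNat : Nat) : Int) := by omega
    generalize hNdef : n.toNat = N at hnN
    have hN1 : 1 ≤ N := by omega
    subst hnN
    unfold count_teleport count_teleport_alt
    simp only []
    rw [pvGetCache_eq _ (by omega),
        show (((N : Nat) : Int)).toNat = N from by omega,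
        pv_b_outer ((N : Nat) : Int) N (by omega) (by omega)]
    simp only [pvRow_split]
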